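-- pv_equiv track=rewrite | github.com/sharvarianand/InterVueX---AI-Interview-Engine | backend/app/services/interview_agents.py | extract_resume_skills
-- ===== SOURCE A (Python) =====
-- from typing import Optional, List, Dict, Any
--
-- def extract_resume_skills(resume_text: str) -> Dict[str, List[str]]:
--     """Extract skills from resume text."""
--     skills = {
--         "programming_languages": [],
--         "frameworks": [],
--         "databases": [],
--         "cloud": [],
--         "tools": [],
--         "soft_skills": []
--     }
--
--     # Programming languages detection
--     languages = ["python", "javascript", "java", "c++", "c#", "go", "rust", "typescript", "ruby", "php", "swift", "kotlin"]
--     for lang in languages: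
--         if lang.lower() in resume_text.lower():
--             skills["programming_languages"].append(lang.capitalize())
--
--     # Frameworks
--     frameworks = ["react", "angular", "vue", "django", "flask", "fastapi", "spring", "express", "nextjs", "node"]
--     for fw in frameworks:
--         if fw.lower() in resume_text.lower():
--             skills["frameworks"].append(fw)
--
--     # Databases
--     databases = ["mysql", "postgresql", "mongodb", "redis", "elasticsearch", "dynamodb", "firebase"]
--     for db in databases:
--         if db.lower() in resume_text.lower():
--             skills["databases"].append(db)
--
--     # Cloud
--     cloud = ["aws", "azure", "gcp", "google cloud", "docker", "kubernetes", "terraform"]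
--     for c in cloud:
--         if c.lower() in resume_text.lower():
--             skills["cloud"].append(c.upper() if len(c) <= 3 else c.capitalize())
--
--     return skills
-- ===== SOURCE B (Python) =====
-- def extract_resume_skills(resume_text: str):
--     """Single scan over the lowered text: at each position, record every keyword that
--     starts there into a found-set; then assemble the six category lists from that set."""
--     text = resume_text.lower()
--     languages = ["python", "javascript", "java", "c++", "c#", "go", "rust", "typescript", "ruby", "php", "swift", "kotlin"]
--     frameworks = ["react", "angular", "vue", "django", "flask", "fastapi", "spring", "express", "nextjs", "node"]
--     databases = ["mysql", "postgresql", "mongodb", "redis", "elasticsearch", "dynamodb", "firebase"]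
--     cloud = ["aws", "azure", "gcp", "google cloud", "docker", "kubernetes", "terraform"]
--     all_keywords = languages + frameworks + databases + cloud
--     found = set()
--     for i in range(len(text)):
--         for kw in all_keywords:
--             if text.startswith(kw, i):
--                 found.add(kw)
--     return {
--         "programming_languages": [l.capitalize() for l in languages if l in found],
--         "frameworks": [f for f in frameworks if f in found],
--         "databases": [d for d in databases if d in found],
--         "cloud": [(c.upper() if len(c) <= 3 else c.capitalize()) for c in cloud if c in found],
--         "tools": [],
--         "soft_skills": [],
--     }
-- ===== Notes on version B (the rewrite author's own statement) =====
-- stated objective: alternative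
-- what changed: Instead of A's four per-category blocks each running an independent whole-text substring search per keyword, B makes one left-to-right scan over the lowered text, recording at each position every keyword that starts there into a found-set, and then assembles all six category lists by membership in that set.
import Mathlib
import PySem

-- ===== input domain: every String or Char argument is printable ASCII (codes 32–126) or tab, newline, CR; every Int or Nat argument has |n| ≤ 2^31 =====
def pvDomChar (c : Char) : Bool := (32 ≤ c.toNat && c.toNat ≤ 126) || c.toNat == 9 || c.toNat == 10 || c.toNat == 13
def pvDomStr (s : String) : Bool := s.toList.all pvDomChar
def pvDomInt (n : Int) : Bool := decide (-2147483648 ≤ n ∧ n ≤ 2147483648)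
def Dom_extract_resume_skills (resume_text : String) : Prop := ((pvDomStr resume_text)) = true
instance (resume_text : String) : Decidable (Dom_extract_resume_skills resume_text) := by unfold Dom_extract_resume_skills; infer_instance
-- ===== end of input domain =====

-- B replaces A's 36 independent substring searches by ONE positional scan of the lowered
-- text that collects every matching keyword into a found-set, then assembles the
-- category lists from that set ('alternative': same asymptotic cost, different data flow).

-- Python's str.capitalize(): first char uppercased, the rest lowercased (exact on ASCII,
-- which is all Dom admits). Shared by both ports, as the builtin is shared in Python.
def pyCapitalize (s : String) : String :=
  match s.toList with
  | [] => ""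
  | c :: rest => String.ofList (PySem.Chars.upperChar c :: PySem.Chars.lower rest)

-- ===== PORT A =====
-- A-side helpers: the body of each of A's four 'for' loops, one definition per loop.
def pvAloop1 (resume_text : String) (d : PySem.Dict String (List String)) (lang : String) : PySem.Dict String (List String) :=
  if PySem.Str.isIn (PySem.Str.lower lang) (PySem.Str.lower resume_text) then
    d.modify "programming_languages" [] (fun l => l ++ [pyCapitalize lang])
  else d

def pvAloop2 (resume_text : String) (d : PySem.Dict String (List String)) (fw : String) : PySem.Dict String (List String) :=
  if PySem.Str.isIn (PySem.Str.lower fw) (PySem.Str.lower resume_text) then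
    d.modify "frameworks" [] (fun l => l ++ [fw])
  else d

def pvAloop3 (resume_text : String) (d : PySem.Dict String (List String)) (db : String) : PySem.Dict String (List String) :=
  if PySem.Str.isIn (PySem.Str.lower db) (PySem.Str.lower resume_text) then
    d.modify "databases" [] (fun l => l ++ [db])
  else d

def pvAloop4 (resume_text : String) (d : PySem.Dict String (List String)) (c : String) : PySem.Dict String (List String) :=
  if PySem.Str.isIn (PySem.Str.lower c) (PySem.Str.lower resume_text) then
    d.modify "cloud" [] (fun l => l ++ [if PySem.Str.len c ≤ 3 then PySem.Str.upper c else pyCapitalize c])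
  else d

def extract_resume_skills (resume_text : String) : List (String × List String) :=
  let skills : PySem.Dict String (List String) :=
    PySem.Dict.ofList [("programming_languages", []), ("frameworks", []), ("databases", []),
                       ("cloud", []), ("tools", []), ("soft_skills", [])]
  let languages := ["python", "javascript", "java", "c++", "c#", "go", "rust", "typescript", "ruby", "php", "swift", "kotlin"]
  let skills := languages.foldl (pvAloop1 resume_text) skills
  let frameworks := ["react", "angular", "vue", "django", "flask", "fastapi", "spring", "express", "nextjs", "node"]
  let skills := frameworks.foldl (pvAloop2 resume_text) skills
  let databases := ["mysql", "postgresql", "mongodb", "redis", "elasticsearch", "dynamodb", "firebase"]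
  let skills := databases.foldl (pvAloop3 resume_text) skills
  let cloud := ["aws", "azure", "gcp", "google cloud", "docker", "kubernetes", "terraform"]
  let skills := cloud.foldl (pvAloop4 resume_text) skills
  skills.items

-- ===== PORT B =====
def extract_resume_skills_alt (resume_text : String) : List (String × List String) :=
  let text := PySem.Str.lower resume_text
  let languages := ["python", "javascript", "java", "c++", "c#", "go", "rust", "typescript", "ruby", "php", "swift", "kotlin"]
  let frameworks := ["react", "angular", "vue", "django", "flask", "fastapi", "spring", "express", "nextjs", "node"]
  let databases := ["mysql", "postgresql", "mongodb", "redis", "elasticsearch", "dynamodb", "firebase"]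
  let cloud := ["aws", "azure", "gcp", "google cloud", "docker", "kubernetes", "terraform"]
  let all_keywords := languages ++ frameworks ++ databases ++ cloud
  -- text.startswith(kw, i) is hand-ported as Chars.startswith on the i-suffix of the
  -- character list — exact since every i from range(len(text)) is nonnegative.
  let found : PySem.Set String :=
    (PySem.List.pyRange 0 (PySem.Str.len text) 1).foldl (fun s i =>
      all_keywords.foldl (fun s kw =>
        if PySem.Chars.startswith (text.toList.drop i.toNat) kw.toList then PySem.Set.add s kw
        else s) s) PySem.Set.empty
  [("programming_languages", (languages.filter (fun l => PySem.Set.contains found l)).map (fun l => pyCapitalize l)),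
   ("frameworks", frameworks.filter (fun f => PySem.Set.contains found f)),
   ("databases", databases.filter (fun d => PySem.Set.contains found d)),
   ("cloud", (cloud.filter (fun c => PySem.Set.contains found c)).map
      (fun c => if PySem.Str.len c ≤ 3 then PySem.Str.upper c else pyCapitalize c)),
   ("tools", []), ("soft_skills", [])]

-- ===== PRECONDITION & SPEC =====
def Spec_extract_resume_skills (resume_text : String) (out : List (String × List String)) : Prop := out = extract_resume_skills_alt resume_text
instance (resume_text : String) (out : List (String × List String)) : Decidable (Spec_extract_resume_skills resume_text out) := by unfold Spec_extract_resume_skills; infer_instance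

-- ===== CLAIM (what is proved, stated in full; the proofs are below) =====
def Claim_equal_extract_resume_skills : Prop := ∀ (resume_text : String), Dom_extract_resume_skills resume_text → Spec_extract_resume_skills resume_text (extract_resume_skills resume_text)

-- ===== LEMMAS AND PROOFS =====

-- The six-key dict with symbolic values.
def pvMkd (v1 v2 v3 v4 v5 v6 : List String) : PySem.Dict String (List String) :=
  PySem.Dict.mk [("programming_languages", v1), ("frameworks", v2), ("databases", v3),
                 ("cloud", v4), ("tools", v5), ("soft_skills", v6)]

theorem pvModify1 (v1 v2 v3 v4 v5 v6 : List String) (f : List String → List String) :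
    (pvMkd v1 v2 v3 v4 v5 v6).modify "programming_languages" [] f = pvMkd (f v1) v2 v3 v4 v5 v6 := rfl

theorem pvModify2 (v1 v2 v3 v4 v5 v6 : List String) (f : List String → List String) :
    (pvMkd v1 v2 v3 v4 v5 v6).modify "frameworks" [] f = pvMkd v1 (f v2) v3 v4 v5 v6 := rfl

theorem pvModify3 (v1 v2 v3 v4 v5 v6 : List String) (f : List String → List String) :
    (pvMkd v1 v2 v3 v4 v5 v6).modify "databases" [] f = pvMkd v1 v2 (f v3) v4 v5 v6 := rfl

theorem pvModify4 (v1 v2 v3 v4 v5 v6 : List String) (f : List String → List String) :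
    (pvMkd v1 v2 v3 v4 v5 v6).modify "cloud" [] f = pvMkd v1 v2 v3 (f v4) v5 v6 := rfl

theorem pvCat1 (p : String → Bool) (f : String → String) (kws : List String)
    (v1 v2 v3 v4 v5 v6 : List String) :
    kws.foldl (fun d x => if p x then d.modify "programming_languages" [] (fun l => l ++ [f x]) else d)
      (pvMkd v1 v2 v3 v4 v5 v6)
    = pvMkd (v1 ++ (kws.filter p).map f) v2 v3 v4 v5 v6 := by
  induction kws generalizing v1 with
  | nil => simp
  | cons x xs ih =>
    by_cases h : p x <;> simp [h, List.foldl_cons, pvModify1, ih]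

theorem pvCat2 (p : String → Bool) (f : String → String) (kws : List String)
    (v1 v2 v3 v4 v5 v6 : List String) :
    kws.foldl (fun d x => if p x then d.modify "frameworks" [] (fun l => l ++ [f x]) else d)
      (pvMkd v1 v2 v3 v4 v5 v6)
    = pvMkd v1 (v2 ++ (kws.filter p).map f) v3 v4 v5 v6 := by
  induction kws generalizing v2 with
  | nil => simp
  | cons x xs ih =>
    by_cases h : p x <;> simp [h, List.foldl_cons, pvModify2, ih]

theorem pvCat3 (p : String → Bool) (f : String → String) (kws : List String)
    (v1 v2 v3 v4 v5 v6 : List String) :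
    kws.foldl (fun d x => if p x then d.modify "databases" [] (fun l => l ++ [f x]) else d)
      (pvMkd v1 v2 v3 v4 v5 v6)
    = pvMkd v1 v2 (v3 ++ (kws.filter p).map f) v4 v5 v6 := by
  induction kws generalizing v3 with
  | nil => simp
  | cons x xs ih =>
    by_cases h : p x <;> simp [h, List.foldl_cons, pvModify3, ih]

theorem pvCat4 (p : String → Bool) (f : String → String) (kws : List String)
    (v1 v2 v3 v4 v5 v6 : List String) :
    kws.foldl (fun d x => if p x then d.modify "cloud" [] (fun l => l ++ [f x]) else d)
      (pvMkd v1 v2 v3 v4 v5 v6)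
    = pvMkd v1 v2 v3 (v4 ++ (kws.filter p).map f) v5 v6 := by
  induction kws generalizing v4 with
  | nil => simp
  | cons x xs ih =>
    by_cases h : p x <;> simp [h, List.foldl_cons, pvModify4, ih]

theorem pvCatH1 (rt : String) (kws : List String) (v1 v2 v3 v4 v5 v6 : List String) :
    kws.foldl (pvAloop1 rt) (pvMkd v1 v2 v3 v4 v5 v6)
    = pvMkd (v1 ++ (kws.filter (fun x => PySem.Str.isIn (PySem.Str.lower x) (PySem.Str.lower rt))).map pyCapitalize) v2 v3 v4 v5 v6 :=
  pvCat1 _ _ kws v1 v2 v3 v4 v5 v6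

theorem pvCatH2 (rt : String) (kws : List String) (v1 v2 v3 v4 v5 v6 : List String) :
    kws.foldl (pvAloop2 rt) (pvMkd v1 v2 v3 v4 v5 v6)
    = pvMkd v1 (v2 ++ (kws.filter (fun x => PySem.Str.isIn (PySem.Str.lower x) (PySem.Str.lower rt))).map (fun fw => fw)) v3 v4 v5 v6 :=
  pvCat2 _ _ kws v1 v2 v3 v4 v5 v6

theorem pvCatH3 (rt : String) (kws : List String) (v1 v2 v3 v4 v5 v6 : List String) :
    kws.foldl (pvAloop3 rt) (pvMkd v1 v2 v3 v4 v5 v6)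
    = pvMkd v1 v2 (v3 ++ (kws.filter (fun x => PySem.Str.isIn (PySem.Str.lower x) (PySem.Str.lower rt))).map (fun db => db)) v4 v5 v6 :=
  pvCat3 _ _ kws v1 v2 v3 v4 v5 v6

theorem pvCatH4 (rt : String) (kws : List String) (v1 v2 v3 v4 v5 v6 : List String) :
    kws.foldl (pvAloop4 rt) (pvMkd v1 v2 v3 v4 v5 v6)
    = pvMkd v1 v2 v3 (v4 ++ (kws.filter (fun x => PySem.Str.isIn (PySem.Str.lower x) (PySem.Str.lower rt))).map
        (fun c => if PySem.Str.len c ≤ 3 then PySem.Str.upper c else pyCapitalize c)) v5 v6 :=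
  pvCat4 _ _ kws v1 v2 v3 v4 v5 v6

-- every keyword literal is already lowercase, so A's per-keyword lang.lower() is the identity
theorem pvFilterLower (t : String) (kws : List String)
    (h : ∀ x ∈ kws, PySem.Str.lower x = x) :
    kws.filter (fun x => PySem.Str.isIn (PySem.Str.lower x) t)
      = kws.filter (fun x => PySem.Str.isIn x t) := by
  induction kws with
  | nil => rfl
  | cons x xs ih =>
    simp only [List.filter_cons, h x (by simp)]
    rw [ih (fun y hy => h y (by simp [hy]))]

-- membership in the inner (per-position) fold of B's scan
theorem pvMemInner (p : String → Bool) (K : List String) (s : PySem.Set String) (x : String) :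
    x ∈ K.foldl (fun s kw => if p kw then PySem.Set.add s kw else s) s
      ↔ x ∈ s ∨ (x ∈ K ∧ p x = true) := by
  induction K generalizing s with
  | nil => simp
  | cons k ks ih =>
    simp only [List.foldl_cons]
    by_cases h : p k
    · rw [if_pos h, ih]
      simp only [PySem.Set.mem_add, List.mem_cons]
      constructor
      · rintro ((hs | he) | hk)
        · exact Or.inl hs
        · exact Or.inr ⟨Or.inl he, he ▸ h⟩
        · exact Or.inr ⟨Or.inr hk.1, hk.2⟩
      · rintro (hs | ⟨(he | hm), hp⟩)
        · exact Or.inl (Or.inl hs)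
        · exact Or.inl (Or.inr he)
        · exact Or.inr ⟨hm, hp⟩
    · rw [if_neg h, ih]
      simp only [List.mem_cons]
      constructor
      · rintro (hs | ⟨hm, hp⟩)
        · exact Or.inl hs
        · exact Or.inr ⟨Or.inr hm, hp⟩
      · rintro (hs | ⟨(he | hm), hp⟩)
        · exact Or.inl hs
        · exact absurd (he ▸ hp) h
        · exact Or.inr ⟨hm, hp⟩

-- membership in the outer (over positions) fold of B's scan
theorem pvMemOuter (q : Int → String → Bool) (K : List String) (P : List Int)
    (s : PySem.Set String) (x : String) :
    x ∈ P.foldl (fun s i => K.foldl (fun s kw => if q i kw then PySem.Set.add s kw else s) s) s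
      ↔ x ∈ s ∨ (x ∈ K ∧ ∃ i ∈ P, q i x = true) := by
  induction P generalizing s with
  | nil => simp
  | cons j js ih =>
    simp only [List.foldl_cons, ih, pvMemInner, List.mem_cons]
    constructor
    · rintro ((hs | ⟨hm, hq⟩) | ⟨hm, i, hi, hq⟩)
      · exact Or.inl hs
      · exact Or.inr ⟨hm, j, Or.inl rfl, hq⟩
      · exact Or.inr ⟨hm, i, Or.inr hi, hq⟩
    · rintro (hs | ⟨hm, i, (rfl | hi), hq⟩)
      · exact Or.inl (Or.inl hs)
      · exact Or.inl (Or.inr ⟨hm, hq⟩)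
      · exact Or.inr ⟨hm, i, hi, hq⟩

-- the positional scan finds a nonempty keyword iff it is an infix ('kw in text')
theorem pvScanIff (t : String) (kw : String) (hne : kw.toList ≠ []) :
    (∃ i ∈ PySem.List.pyRange 0 (PySem.Str.len t) 1,
        PySem.Chars.startswith (t.toList.drop i.toNat) kw.toList = true)
      ↔ PySem.Str.isIn kw t = true := by
  rw [PySem.Str.isIn_eq, ← PySem.Chars.exists_prefix_drop_iff_isIn]
  constructor
  · rintro ⟨i, _, hsw⟩
    exact ⟨i.toNat, (PySem.Chars.startswith_iff _ _).1 hsw⟩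
  · rintro ⟨j, hpre⟩
    by_cases hj : j < t.toList.length
    · refine ⟨(j : Int), ?_, ?_⟩
      · rw [PySem.List.mem_pyRange_one]
        constructor
        · exact Int.natCast_nonneg j
        · simp only [PySem.Str.len_eq]
          exact_mod_cast hj
      · rw [PySem.Chars.startswith_iff]
        simpa using hpre
    · exfalso
      rw [List.drop_eq_nil_of_le (by omega)] at hpre
      exact hne (List.prefix_nil.mp hpre)

theorem pvOfList6 :
    (PySem.Dict.ofList [("programming_languages", ([] : List String)), ("frameworks", []), ("databases", []),
                        ("cloud", []), ("tools", []), ("soft_skills", [])])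
    = pvMkd [] [] [] [] [] [] := rfl

-- ===== VERDICT (by name: the statement is the Claim_ definition above) =====
theorem extract_resume_skills_spec : Claim_equal_extract_resume_skills := by
  intro resume_text _
  unfold Spec_extract_resume_skills extract_resume_skills extract_resume_skills_alt
  simp only [pvOfList6]
  rw [pvCatH1, pvCatH2, pvCatH3, pvCatH4,
      pvFilterLower _ _ (by decide), pvFilterLower _ _ (by decide),
      pvFilterLower _ _ (by decide), pvFilterLower _ _ (by decide)]
  have hfound : ∀ (L : List String),
      (∀ x ∈ L, x ∈ (["python", "javascript", "java", "c++", "c#", "go", "rust", "typescript", "ruby", "php", "swift", "kotlin"]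
        ++ ["react", "angular", "vue", "django", "flask", "fastapi", "spring", "express", "nextjs", "node"]
        ++ ["mysql", "postgresql", "mongodb", "redis", "elasticsearch", "dynamodb", "firebase"]
        ++ ["aws", "azure", "gcp", "google cloud", "docker", "kubernetes", "terraform"]) ∧ x.toList ≠ []) →
      L.filter (fun kw => PySem.Set.contains
        ((PySem.List.pyRange 0 (PySem.Str.len (PySem.Str.lower resume_text)) 1).foldl (fun s i =>
          (["python", "javascript", "java", "c++", "c#", "go", "rust", "typescript", "ruby", "php", "swift", "kotlin"]
            ++ ["react", "angular", "vue", "django", "flask", "fastapi", "spring", "express", "nextjs", "node"]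
            ++ ["mysql", "postgresql", "mongodb", "redis", "elasticsearch", "dynamodb", "firebase"]
            ++ ["aws", "azure", "gcp", "google cloud", "docker", "kubernetes", "terraform"]).foldl (fun s kw =>
            if PySem.Chars.startswith ((PySem.Str.lower resume_text).toList.drop i.toNat) kw.toList then PySem.Set.add s kw
            else s) s) PySem.Set.empty) kw)
        = L.filter (fun kw => PySem.Str.isIn kw (PySem.Str.lower resume_text)) := by
    intro L hL
    apply List.filter_congr
    intro kw hkw
    rw [Bool.eq_iff_iff, PySem.Set.contains_iff, pvMemOuter]
    constructor
    · rintro (hs | ⟨_, i, hi, hq⟩)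
      · simp [PySem.Set.empty] at hs
      · exact (pvScanIff _ _ (hL kw hkw).2).1 ⟨i, hi, hq⟩
    · intro hin
      exact Or.inr ⟨(hL kw hkw).1, (pvScanIff _ _ (hL kw hkw).2).2 hin⟩
  simp only [pvMkd, List.nil_append]
  rw [hfound _ (by decide), hfound _ (by decide), hfound _ (by decide), hfound _ (by decide)]
  simp
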